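-- pv_equiv track=rewrite | github.com/TanjimTajwar/Algorithm_Lab_Task | From Niloy/B_Two_Large_Bags.py | minimize_max_sum
-- ===== SOURCE A (Python) =====
-- def minimize_max_sum(n, numbers):
--     numbers.sort(reverse=True)
--     sum1 = sum2 = 0
--     for num in numbers:
--         if sum1 <= sum2:
--             sum1 += num
--         else:
--             sum2 += num
--     return max(sum1, sum2)
-- ===== SOURCE B (Python) =====
-- def minimize_max_sum(n, numbers):
--     numbers.sort(reverse=True)
--     total = sum(numbers)
--     d = 0
--     for num in numbers:
--         d = abs(d - num)
--     return (total + d) // 2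
-- ===== Notes on version B (the rewrite author's own statement) =====
-- stated objective: alternative
-- what changed: B replaces A's two-sum accumulator with a branch by a single scalar fold of the gap d = abs(d - num) and recovers the answer in closed form as (total + d) // 2.
import Mathlib
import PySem

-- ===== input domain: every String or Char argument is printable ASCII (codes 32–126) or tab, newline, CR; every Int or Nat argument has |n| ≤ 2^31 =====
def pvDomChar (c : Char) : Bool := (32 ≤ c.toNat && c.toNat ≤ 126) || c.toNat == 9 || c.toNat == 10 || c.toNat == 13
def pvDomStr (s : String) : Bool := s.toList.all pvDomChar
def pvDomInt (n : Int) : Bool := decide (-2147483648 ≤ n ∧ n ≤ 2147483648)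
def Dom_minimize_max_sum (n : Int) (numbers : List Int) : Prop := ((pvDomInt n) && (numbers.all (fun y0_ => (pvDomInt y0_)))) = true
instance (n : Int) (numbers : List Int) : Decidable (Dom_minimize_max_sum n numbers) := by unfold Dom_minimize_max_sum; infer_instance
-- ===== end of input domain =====

-- B keeps a single scalar (the gap between the two bags) instead of two sums and a branch,
-- and recovers the answer as (total + gap) // 2; equivalence of the RETURN value is proved
-- (both A and B sort `numbers` in place, the same mutation). Objective: alternative.

-- ===== PORT A =====
def minimize_max_sum (n : Int) (numbers : List Int) : Int :=
  let nums := PySem.List.sorted numbers (fun x => x) true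
  let p := nums.foldl
    (fun (s : Int × Int) num => if s.1 ≤ s.2 then (s.1 + num, s.2) else (s.1, s.2 + num))
    (0, 0)
  max p.1 p.2

-- ===== PORT B =====
def minimize_max_sum_alt (n : Int) (numbers : List Int) : Int :=
  let nums := PySem.List.sorted numbers (fun x => x) true
  let total := nums.sum
  let d := nums.foldl (fun d num => |d - num|) 0
  PySem.Int.floordiv (total + d) 2

-- ===== PRECONDITION & SPEC =====
def Spec_minimize_max_sum (n : Int) (numbers : List Int) (out : Int) : Prop := out = minimize_max_sum_alt n numbers
instance (n : Int) (numbers : List Int) (out : Int) : Decidable (Spec_minimize_max_sum n numbers out) := by unfold Spec_minimize_max_sum; infer_instance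

-- ===== CLAIM (what is proved, stated in full; the proofs are below) =====
def Claim_equal_minimize_max_sum : Prop := ∀ (n : Int) (numbers : List Int), Dom_minimize_max_sum n numbers → Spec_minimize_max_sum n numbers (minimize_max_sum n numbers)

-- ===== LEMMAS AND PROOFS =====

-- Loop invariant: A's two-sum fold and B's gap fold stay in lockstep:
-- the gap fold started at |s1 - s2| computes the absolute difference of A's final pair,
-- and A's pair sums to the initial sum plus the list sum.
theorem pv_inv (l : List Int) : ∀ (s1 s2 : Int),
    (l.foldl (fun (s : Int × Int) num => if s.1 ≤ s.2 then (s.1 + num, s.2) else (s.1, s.2 + num)) (s1, s2)).1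
      + (l.foldl (fun (s : Int × Int) num => if s.1 ≤ s.2 then (s.1 + num, s.2) else (s.1, s.2 + num)) (s1, s2)).2
      = s1 + s2 + l.sum
    ∧ l.foldl (fun d num => |d - num|) |s1 - s2|
      = |(l.foldl (fun (s : Int × Int) num => if s.1 ≤ s.2 then (s.1 + num, s.2) else (s.1, s.2 + num)) (s1, s2)).1
          - (l.foldl (fun (s : Int × Int) num => if s.1 ≤ s.2 then (s.1 + num, s.2) else (s.1, s.2 + num)) (s1, s2)).2| := by
  induction l with
  | nil => intro s1 s2; simp
  | cons x t ih =>
    intro s1 s2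
    by_cases h : s1 ≤ s2
    · have h1 : |s1 - s2| - x = -((s1 + x) - s2) := by
        have : |s1 - s2| = s2 - s1 := abs_sub_comm s1 s2 ▸ abs_of_nonneg (by omega)
        omega
      have h2 : |(|s1 - s2| - x)| = |(s1 + x) - s2| := by rw [h1, abs_neg]
      obtain ⟨ih1, ih2⟩ := ih (s1 + x) s2
      refine ⟨?_, ?_⟩
      · simp only [List.foldl_cons, if_pos h, List.sum_cons]; linarith [ih1]
      · simpa [List.foldl_cons, h, h2] using ih2
    · have h1 : |s1 - s2| = s1 - s2 := abs_of_nonneg (by omega)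
      have h2 : |(|s1 - s2| - x)| = |s1 - (s2 + x)| := by rw [h1]; ring_nf
      obtain ⟨ih1, ih2⟩ := ih s1 (s2 + x)
      refine ⟨?_, ?_⟩
      · simp only [List.foldl_cons, if_neg h, List.sum_cons]; linarith [ih1]
      · simpa [List.foldl_cons, h, h2] using ih2

-- ===== VERDICT (by name: the statement is the Claim_ definition above) =====
theorem minimize_max_sum_spec : Claim_equal_minimize_max_sum := by
  intro n numbers _
  unfold Spec_minimize_max_sum minimize_max_sum minimize_max_sum_alt
  dsimp only
  obtain ⟨hsum, hgap⟩ := pv_inv (PySem.List.sorted numbers (fun x => x) true) 0 0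
  set nums := PySem.List.sorted numbers (fun x => x) true
  set p := nums.foldl
    (fun (s : Int × Int) num => if s.1 ≤ s.2 then (s.1 + num, s.2) else (s.1, s.2 + num))
    (0, 0) with hp
  norm_num at hsum hgap
  rw [PySem.Int.floordiv_eq_ediv_of_pos (by norm_num)]
  have := abs_sub_abs_le_abs_sub p.1 p.2
  rcases le_total p.1 p.2 with hle | hle
  · have : |p.1 - p.2| = p.2 - p.1 := abs_sub_comm p.1 p.2 ▸ abs_of_nonneg (by omega)
    rw [hgap, this]
    have : max p.1 p.2 = p.2 := max_eq_right hle
    omega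
  · have : |p.1 - p.2| = p.1 - p.2 := abs_of_nonneg (by omega)
    rw [hgap, this]
    have : max p.1 p.2 = p.1 := max_eq_left hle
    omega
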